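-- pv_equiv track=rewrite | github.com/Christian-Albertini/python-challenge | Starter_Code/PyBank/main.py | find_inc
-- ===== SOURCE A (Python) =====
-- def find_inc(lst):
--     # Create values
--     max_increase = 0
--     months_num = 0
--     # Loop through list
--     for i in range(1, len(lst)):
--         # Set increase to be the change from i-1 to i
--         increase = int(lst[i])-int(lst[i-1])
--         # Check to see if increase is greater than max increase
--         if increase > max_increase:
--             # If so, max_increase becomes increase and the value for the month it happens in is set as i
--             max_increase = increase
--             months_num = i
--     # Return the max increase and the number cooresponding with the month it happens in
--     return [months_num, max_increase]
-- ===== SOURCE B (Python) =====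
-- def find_inc(lst):
--     # Materialize the month-over-month difference table, then take its max
--     # and the first index where it occurs.
--     diffs = [int(lst[i]) - int(lst[i - 1]) for i in range(1, len(lst))]
--     if not diffs:
--         return [0, 0]
--     m = max(diffs)
--     if m <= 0:
--         return [0, 0]
--     return [diffs.index(m) + 1, m]
-- ===== Notes on version B (the rewrite author's own statement) =====
-- stated objective: idiomatic
-- what changed: Replaces the fused running-max loop with a materialized difference list followed by max() and a first-occurrence index() lookup, with the [0,0] default when no positive increase exists.
import Mathlib
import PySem

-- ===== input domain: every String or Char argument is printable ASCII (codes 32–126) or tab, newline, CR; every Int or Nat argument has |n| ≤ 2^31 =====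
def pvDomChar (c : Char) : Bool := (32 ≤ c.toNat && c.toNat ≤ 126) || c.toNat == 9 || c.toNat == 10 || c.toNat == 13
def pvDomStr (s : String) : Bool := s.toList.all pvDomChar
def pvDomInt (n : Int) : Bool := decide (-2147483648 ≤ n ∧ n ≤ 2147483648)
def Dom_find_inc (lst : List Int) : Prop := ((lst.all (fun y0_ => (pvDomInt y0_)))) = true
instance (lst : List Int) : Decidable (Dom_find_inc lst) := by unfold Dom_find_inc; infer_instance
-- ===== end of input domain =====

-- B replaces A's fused running-max loop by a materialized difference list plus max()/first-index lookup (idiomatic decomposition, same cost).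

-- ===== PORT A =====
-- Literal port of A: running max over range(1, len(lst)); indices are always in
-- range, so pyGetD with default 0 is exact here.
def find_inc (lst : List Int) : List Int :=
  let s := (PySem.List.pyRange 1 (lst.length : Int) 1).foldl
    (fun (st : Int × Int) (i : Int) =>
      let increase := PySem.List.pyGetD lst i 0 - PySem.List.pyGetD lst (i - 1) 0
      if increase > st.1 then (increase, i) else st) (0, 0)
  [s.2, s.1]

-- ===== PORT B =====
-- Literal port of Source B: diffs table, emptiness guard, max, first index.
-- max() is taken only when diffs ≠ [] and .index only on the max, which is a
-- member, so the .getD defaults are never used.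
def find_inc_alt (lst : List Int) : List Int :=
  let diffs := (PySem.List.pyRange 1 (lst.length : Int) 1).map
    (fun i => PySem.List.pyGetD lst i 0 - PySem.List.pyGetD lst (i - 1) 0)
  if diffs = [] then [0, 0]
  else
    let m := (PySem.List.max? diffs (fun y => y)).getD 0
    if m ≤ 0 then [0, 0]
    else [(((PySem.List.index? diffs m).getD 0 : Nat) : Int) + 1, m]

-- ===== PRECONDITION & SPEC =====
def Spec_find_inc (lst : List Int) (out : List Int) : Prop := out = find_inc_alt lst
instance (lst : List Int) (out : List Int) : Decidable (Spec_find_inc lst out) := by unfold Spec_find_inc; infer_instance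

-- ===== CLAIM (what is proved, stated in full; the proofs are below) =====
def Claim_equal_find_inc : Prop := ∀ (lst : List Int), Dom_find_inc lst → Spec_find_inc lst (find_inc lst)

-- ===== LEMMAS AND PROOFS =====

-- A's loop, rephrased as a structural recursion over the difference list with
-- an explicit index counter.
def foldE (ds : List Int) (off : Int) (st : Int × Int) : Int × Int :=
  match ds with
  | [] => st
  | d :: t => foldE t (off + 1) (if d > st.1 then (d, off) else st)

lemma foldl_max_split (t : List Int) : ∀ a b : Int, t.foldl max (max a b) = max a (t.foldl max b) := by
  induction t with
  | nil => intro a b; rfl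
  | cons c t ih =>
    intro a b
    simp only [List.foldl_cons]
    rw [max_assoc, ih]

-- A's fold over range(1, n) equals foldE over the mapped difference list.
lemma fold_eq_foldE (f : Int → Int) : ∀ (n : Nat) (a : Int) (st : Int × Int), n = ((a + n) - a).toNat →
    (PySem.List.pyRange a (a + n) 1).foldl (fun st i => if f i > st.1 then (f i, i) else st) st
    = foldE ((PySem.List.pyRange a (a + n) 1).map f) a st := by
  intro n
  induction n with
  | zero => intro a st _; simp [foldE]
  | succ k ih =>
    intro a st _
    rw [PySem.List.pyRange_one_cons (by push_cast; omega)]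
    simp only [List.foldl_cons, List.map_cons, foldE]
    have h : a + ((k + 1 : Nat) : Int) = (a + 1) + (k : Nat) := by push_cast; ring
    rw [h, ih (a + 1) _ (by omega)]

-- Characterization of foldE: the final max is the list max when it beats the
-- incoming one, and the recorded position is off + the first index of that max.
lemma foldE_char : ∀ (ds : List Int) (off m k : Int),
    foldE ds off (m, k) =
      (PySem.List.max? ds (fun y => y)).elim (m, k)
        (fun M => if m < M then (M, off + (((PySem.List.index? ds M).getD 0 : Nat) : Int)) else (m, k)) := by
  intro ds
  induction ds with
  | nil => intro off m k; simp [foldE, PySem.List.max?]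
  | cons d t ih =>
    intro off m k
    simp only [foldE, PySem.List.max?_id_cons, Option.elim_some]
    cases t with
    | nil =>
      simp only [foldE, List.foldl_nil]
      by_cases h : m < d
      · rw [if_pos (show d > m from h), if_pos h, PySem.List.index?_cons_self]
        simp
      · rw [if_neg (show ¬ d > m from h), if_neg h]
    | cons e t' =>
      have hmax : List.foldl max d (e :: t') = max d (List.foldl max e t') := by
        simp only [List.foldl_cons]
        rw [foldl_max_split]
      set Mt := List.foldl max e t' with hMt
      have hmaxT : PySem.List.max? (e :: t') (fun y => y) = some Mt := PySem.List.max?_id_cons e t'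
      have hMtmem : Mt ∈ e :: t' := PySem.List.max?_mem hmaxT
      rcases Option.isSome_iff_exists.mp ((PySem.List.index?_isSome_iff (e :: t') Mt).mpr hMtmem) with ⟨j, hj⟩
      rw [hmax]
      by_cases h1 : m < d
      · rw [if_pos (show d > m from h1), ih (off + 1) d off, hmaxT, Option.elim_some]
        by_cases h2 : d < Mt
        · rw [if_pos h2, max_eq_right h2.le, if_pos (h1.trans h2),
            PySem.List.index?_cons_of_ne _ (ne_of_lt h2), hj]
          simp only [Option.map_some, Option.getD_some]
          refine Prod.ext rfl ?_
          push_cast; ring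
        · rw [if_neg h2, max_eq_left (le_of_not_gt h2), if_pos h1, PySem.List.index?_cons_self]
          simp
      · rw [if_neg (show ¬ d > m from h1), ih (off + 1) m k, hmaxT, Option.elim_some]
        have hdm : d ≤ m := le_of_not_gt h1
        by_cases h2 : m < Mt
        · rw [if_pos h2, max_eq_right (hdm.trans h2.le), if_pos h2,
            PySem.List.index?_cons_of_ne _ (ne_of_lt (hdm.trans_lt h2)), hj]
          simp only [Option.map_some, Option.getD_some]
          refine Prod.ext rfl ?_
          push_cast; ring
        · rw [if_neg h2, if_neg (fun hc => (lt_max_iff.mp hc).elim h1 h2)]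

-- ===== VERDICT (by name: the statement is the Claim_ definition above) =====
theorem find_inc_spec : Claim_equal_find_inc := by
  intro lst _
  unfold Spec_find_inc find_inc find_inc_alt
  set f : Int → Int := fun i => PySem.List.pyGetD lst i 0 - PySem.List.pyGetD lst (i - 1) 0 with hf
  have hrw : (1 : Int) + ((lst.length - 1 : Int).toNat : Int) = (lst.length : Int) ∨ (lst.length : Int) ≤ 1 := by omega
  by_cases hlen : (lst.length : Int) ≤ 1
  · rw [PySem.List.pyRange_one_eq_nil hlen]
    simp
  · rw [not_le] at hlen
    have h1 : (PySem.List.pyRange 1 (lst.length : Int) 1) = PySem.List.pyRange 1 (1 + ((lst.length - 1 : Int).toNat : Int)) 1 := by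
      congr 1; omega
    rw [h1, fold_eq_foldE f _ 1 _ (by omega)]
    set ds := (PySem.List.pyRange 1 (1 + ((lst.length - 1 : Int).toNat : Int)) 1).map f with hds
    rw [foldE_char ds 1 0 0]
    have hne : ds ≠ [] := by
      simp only [hds, ne_eq, List.map_eq_nil_iff]
      intro hc
      have := congrArg List.length hc
      rw [PySem.List.length_pyRange_one] at this
      simp at this
      omega
    rcases hM : PySem.List.max? ds (fun y => y) with _ | M
    · exact absurd ((PySem.List.max?_eq_none_iff ds _).mp hM) hne
    · rw [if_neg hne, hM]
      simp only [Option.elim_some, Option.getD_some]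
      by_cases hpos : 0 < M
      · rw [if_pos hpos, if_neg (by omega)]
        simp [add_comm]
      · rw [if_neg hpos, if_pos (by omega)]
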